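-- pv_equiv track=rewrite | github.com/Bnobody47/Z-Data-Contract-Enforcer | contracts/attributor.py | upstream_producer_files
-- ===== SOURCE A (Python) =====
-- def upstream_producer_files(edges: list, consumer_id: str | None, contract_id: str) -> tuple[list[str], int]:
--     """
--     Traverse upstream from Week 7 consumer: edges FILE -CONSUMES-> PIPELINE (target=consumer).
--     Returns (producer_file_node_ids, hop_count=1 when direct link exists).
--     """
--     if not consumer_id:
--         return [], 0
--     cid = contract_id.lower()
--     producers = []
--     for e in edges or []:
--         if e.get("target") != consumer_id:
--             continue
--         if str(e.get("relationship", "")).upper() != "CONSUMES":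
--             continue
--         src = e.get("source")
--         if not src:
--             continue
--         sl = str(src).lower()
--         if "week3" in cid and ("week3" in sl or "extraction" in sl):
--             producers.append(src)
--         elif "week5" in cid and ("week5" in sl or "event" in sl):
--             producers.append(src)
--     if not producers:
--         for e in edges or []:
--             if e.get("target") == consumer_id and str(e.get("relationship", "")).upper() == "CONSUMES":
--                 s = e.get("source")
--                 if s:
--                     producers.append(s)
--     producers = list(dict.fromkeys(producers))
--     hops = 1 if producers else 0
--     return producers, hops
-- ===== SOURCE B (Python) =====
-- def upstream_producer_files(edges: list, consumer_id: str | None, contract_id: str) -> tuple[list[str], int]: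
--     """Single backward pass over edges, maintaining two already-deduplicated
--     accumulators (keyword hits and all candidates) by cons-and-purge; the
--     front-most occurrence naturally wins, so no dict.fromkeys stage is needed."""
--     if not consumer_id:
--         return [], 0
--     cid = contract_id.lower()
--     w3 = "week3" in cid
--     w5 = "week5" in cid
--     hits, cands = [], []
--     for e in reversed(edges or []):
--         if e.get("target") != consumer_id:
--             continue
--         if str(e.get("relationship", "")).upper() != "CONSUMES":
--             continue
--         s = e.get("source")
--         if not s:
--             continue
--         cands = [s] + [x for x in cands if x != s]
--         sl = str(s).lower()
--         if (w3 and ("week3" in sl or "extraction" in sl)) or (w5 and ("week5" in sl or "event" in sl)):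
--             hits = [s] + [x for x in hits if x != s]
--     producers = hits or cands
--     return producers, (1 if producers else 0)
-- ===== Notes on version B (the rewrite author's own statement) =====
-- stated objective: alternative
-- what changed: B replaces A's two forward scans plus a final dict.fromkeys dedup by one backward scan that maintains two already-deduplicated accumulators (keyword hits and all candidates) via cons-and-purge, so the front-most occurrence wins by construction and the fallback is just 'hits or cands'.
import Mathlib
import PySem

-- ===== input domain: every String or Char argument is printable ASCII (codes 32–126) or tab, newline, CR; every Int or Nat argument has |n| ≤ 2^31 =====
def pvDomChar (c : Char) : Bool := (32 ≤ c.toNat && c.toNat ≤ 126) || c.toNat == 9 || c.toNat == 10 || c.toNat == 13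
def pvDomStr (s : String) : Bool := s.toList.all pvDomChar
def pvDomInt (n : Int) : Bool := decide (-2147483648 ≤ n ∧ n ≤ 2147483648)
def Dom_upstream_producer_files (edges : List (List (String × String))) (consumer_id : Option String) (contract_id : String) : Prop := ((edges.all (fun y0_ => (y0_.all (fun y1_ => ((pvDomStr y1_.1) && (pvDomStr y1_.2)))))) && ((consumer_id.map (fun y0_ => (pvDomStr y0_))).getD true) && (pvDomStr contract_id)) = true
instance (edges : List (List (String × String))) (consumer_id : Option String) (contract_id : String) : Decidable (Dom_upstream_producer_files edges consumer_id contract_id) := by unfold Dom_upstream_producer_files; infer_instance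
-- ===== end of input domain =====

-- B replaces A's two forward scans plus a final dict.fromkeys dedup by one backward scan
-- maintaining two already-deduplicated accumulators (hits/candidates) via cons-and-purge.

-- ===== PORT A =====
def upstream_producer_files (edges : List (List (String × String))) (consumer_id : Option String) (contract_id : String) : List String × Int :=
  match consumer_id with
  | none => ([], 0)
  | some c =>
    if c = "" then ([], 0)
    else
      let cid := PySem.Str.lower contract_id
      let producers := edges.foldl (fun acc e =>
        let d := PySem.Dict.ofList e
        if PySem.Dict.get? d "target" ≠ some c then acc
        else if PySem.Str.upper (PySem.Dict.getD d "relationship" "") ≠ "CONSUMES" then acc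
        else
          match PySem.Dict.get? d "source" with
          | none => acc
          | some src =>
            if src = "" then acc
            else
              let sl := PySem.Str.lower src
              if PySem.Str.isIn "week3" cid && (PySem.Str.isIn "week3" sl || PySem.Str.isIn "extraction" sl) then
                acc ++ [src]
              else if PySem.Str.isIn "week5" cid && (PySem.Str.isIn "week5" sl || PySem.Str.isIn "event" sl) then
                acc ++ [src]
              else acc) []
      let producers := if producers = [] then
          edges.foldl (fun acc e =>
            let d := PySem.Dict.ofList e
            if PySem.Dict.get? d "target" == some c && PySem.Str.upper (PySem.Dict.getD d "relationship" "") == "CONSUMES" then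
              match PySem.Dict.get? d "source" with
              | none => acc
              | some s => if s = "" then acc else acc ++ [s]
            else acc) []
        else producers
      let producers := PySem.List.dedup producers
      (producers, if producers = [] then 0 else 1)

-- ===== PORT B =====
-- one backward pass (Python's 'for e in reversed(edges)'): state = (hits, cands), each kept
-- deduplicated by cons-and-purge so the front-most occurrence wins
def upstream_producer_files_alt (edges : List (List (String × String))) (consumer_id : Option String) (contract_id : String) : List String × Int :=
  match consumer_id with
  | none => ([], 0)
  | some c =>
    if c = "" then ([], 0)
    else
      let cid := PySem.Str.lower contract_id
      let w3 := PySem.Str.isIn "week3" cid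
      let w5 := PySem.Str.isIn "week5" cid
      let st := (edges.reverse).foldl (fun (p : List String × List String) e =>
        let d := PySem.Dict.ofList e
        if PySem.Dict.get? d "target" ≠ some c then p
        else if PySem.Str.upper (PySem.Dict.getD d "relationship" "") ≠ "CONSUMES" then p
        else
          match PySem.Dict.get? d "source" with
          | none => p
          | some s =>
            if s = "" then p
            else
              let cands := s :: p.2.filter (fun x => x != s)
              let sl := PySem.Str.lower s
              if (w3 && (PySem.Str.isIn "week3" sl || PySem.Str.isIn "extraction" sl))
                 || (w5 && (PySem.Str.isIn "week5" sl || PySem.Str.isIn "event" sl)) then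
                (s :: p.1.filter (fun x => x != s), cands)
              else (p.1, cands)) ([], [])
      let producers := if st.1 = [] then st.2 else st.1
      (producers, if producers = [] then 0 else 1)

-- ===== PRECONDITION & SPEC =====
def Spec_upstream_producer_files (edges : List (List (String × String))) (consumer_id : Option String) (contract_id : String) (out : List String × Int) : Prop := out = upstream_producer_files_alt edges consumer_id contract_id
instance (edges : List (List (String × String))) (consumer_id : Option String) (contract_id : String) (out : List String × Int) : Decidable (Spec_upstream_producer_files edges consumer_id contract_id out) := by unfold Spec_upstream_producer_files; infer_instance

-- ===== CLAIM =====
def Claim_equal_upstream_producer_files : Prop := ∀ (edges : List (List (String × String))) (consumer_id : Option String) (contract_id : String), Dom_upstream_producer_files edges consumer_id contract_id → Spec_upstream_producer_files edges consumer_id contract_id (upstream_producer_files edges consumer_id contract_id)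

-- ===== LEMMAS AND PROOFS =====

-- the keyword predicate of A's first loop / B's step, as a function
def keywordHit (cid : String) (s : String) : Bool :=
  (PySem.Str.isIn "week3" cid && (PySem.Str.isIn "week3" (PySem.Str.lower s) || PySem.Str.isIn "extraction" (PySem.Str.lower s)))
  || (PySem.Str.isIn "week5" cid && (PySem.Str.isIn "week5" (PySem.Str.lower s) || PySem.Str.isIn "event" (PySem.Str.lower s)))

-- the "valid consuming source" contribution of one edge (A's fallback-loop step)
def candStep (c : String) (acc : List String) (e : List (String × String)) : List String :=
  let d := PySem.Dict.ofList e
  if PySem.Dict.get? d "target" == some c && PySem.Str.upper (PySem.Dict.getD d "relationship" "") == "CONSUMES" then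
    match PySem.Dict.get? d "source" with
    | none => acc
    | some s => if s = "" then acc else acc ++ [s]
  else acc

-- first-occurrence dedup in "cons and purge" form
def rd : List String → List String
  | [] => []
  | a :: l => a :: (rd l).filter (fun x => x != a)

theorem rd_eq_nil_iff (l : List String) : rd l = [] ↔ l = [] := by
  cases l <;> simp [rd]

theorem foldl_add_eq (l : List String) : ∀ (init : List String),
    l.foldl PySem.Set.add init = init ++ (rd l).filter (fun x => !init.contains x) := by
  induction l with
  | nil => intro init; simp [rd]
  | cons a l ih =>
    intro init
    simp only [List.foldl, rd, List.filter]
    by_cases h : init.contains a = true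
    · have hmem : a ∈ init := by simpa using h
      have hadd : PySem.Set.add init a = init := by
        simp [PySem.Set.add, PySem.Set.contains, hmem]
      rw [hadd, ih init]
      have hna : (!init.contains a) = false := by simpa using hmem
      rw [hna]
      simp only [List.filter_filter]
      congr 1
      apply List.filter_congr
      intro x _
      by_cases hx : x = a
      · subst hx; simp [hmem]
      · simp [bne_iff_ne, hx]
    · have hmem : a ∉ init := by simpa using h
      have hadd : PySem.Set.add init a = init ++ [a] := by
        simp [PySem.Set.add, PySem.Set.contains, hmem]
      rw [hadd, ih (init ++ [a])]
      have hna : (!init.contains a) = true := by simp [hmem]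
      rw [hna]
      simp only [List.filter_filter, List.append_assoc, List.singleton_append]
      congr 2
      apply List.filter_congr
      intro x _
      by_cases hx : x = a
      · subst hx; simp [hmem]
      · simp [bne_iff_ne, hx, List.contains_eq_mem]

theorem ofList_eq_rd (l : List String) : PySem.Set.ofList l = rd l := by
  rw [PySem.Set.ofList_eq_foldl, foldl_add_eq l []]
  simp

-- the candidate loop appends: foldl from acc is acc ++ foldl from []
theorem candStep_append (c : String) (edges : List (List (String × String))) (acc : List String) :
    edges.foldl (candStep c) acc = acc ++ edges.foldl (candStep c) [] := by
  induction edges generalizing acc with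
  | nil => simp [List.foldl]
  | cons e es ih =>
    simp only [List.foldl]
    rw [ih (candStep c acc e), ih (candStep c [] e)]
    have : candStep c acc e = acc ++ candStep c [] e := by
      unfold candStep
      by_cases h : (PySem.Dict.get? (PySem.Dict.ofList e) "target" == some c && PySem.Str.upper (PySem.Dict.getD (PySem.Dict.ofList e) "relationship" "") == "CONSUMES") = true
      · simp only [h, if_true]
        cases PySem.Dict.get? (PySem.Dict.ofList e) "source" with
        | none => simp
        | some s => by_cases hs : s = "" <;> simp [hs]
      · simp [h]
    rw [this, List.append_assoc]

-- A's first loop over an edge list equals the keyword filter of the candidate list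
theorem pass1_eq_filter (c cid : String) (edges : List (List (String × String))) (acc : List String) :
    edges.foldl (fun acc e =>
        let d := PySem.Dict.ofList e
        if PySem.Dict.get? d "target" ≠ some c then acc
        else if PySem.Str.upper (PySem.Dict.getD d "relationship" "") ≠ "CONSUMES" then acc
        else
          match PySem.Dict.get? d "source" with
          | none => acc
          | some src =>
            if src = "" then acc
            else
              let sl := PySem.Str.lower src
              if PySem.Str.isIn "week3" cid && (PySem.Str.isIn "week3" sl || PySem.Str.isIn "extraction" sl) then
                acc ++ [src]
              else if PySem.Str.isIn "week5" cid && (PySem.Str.isIn "week5" sl || PySem.Str.isIn "event" sl) then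
                acc ++ [src]
              else acc) acc
      = acc ++ (edges.foldl (candStep c) []).filter (keywordHit cid) := by
  induction edges generalizing acc with
  | nil => simp [List.foldl]
  | cons e es ih =>
    simp only [List.foldl]
    rw [ih, candStep_append c es (candStep c [] e), List.filter_append]
    have hstep : (let d := PySem.Dict.ofList e
        if PySem.Dict.get? d "target" ≠ some c then acc
        else if PySem.Str.upper (PySem.Dict.getD d "relationship" "") ≠ "CONSUMES" then acc
        else
          match PySem.Dict.get? d "source" with
          | none => acc
          | some src =>
            if src = "" then acc
            else
              let sl := PySem.Str.lower src
              if PySem.Str.isIn "week3" cid && (PySem.Str.isIn "week3" sl || PySem.Str.isIn "extraction" sl) then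
                acc ++ [src]
              else if PySem.Str.isIn "week5" cid && (PySem.Str.isIn "week5" sl || PySem.Str.isIn "event" sl) then
                acc ++ [src]
              else acc)
        = acc ++ (candStep c [] e).filter (keywordHit cid) := by
      unfold candStep
      by_cases ht : PySem.Dict.get? (PySem.Dict.ofList e) "target" = some c
      · by_cases hr : PySem.Str.upper (PySem.Dict.getD (PySem.Dict.ofList e) "relationship" "") = "CONSUMES"
        · simp only [ht, hr]
          cases PySem.Dict.get? (PySem.Dict.ofList e) "source" with
          | none => simp
          | some src =>
            by_cases hs : src = ""
            · simp [hs]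
            · simp only [hs, ne_eq, not_true_eq_false, if_false, beq_self_eq_true,
                Bool.true_and]
              by_cases h3 : (PySem.Str.isIn "week3" cid && (PySem.Str.isIn "week3" (PySem.Str.lower src) || PySem.Str.isIn "extraction" (PySem.Str.lower src))) = true
              · have hk : keywordHit cid src = true := by
                  unfold keywordHit; rw [h3]; rfl
                simp only [h3, if_true]
                simp [hk]
              · rw [Bool.not_eq_true] at h3
                by_cases h5 : (PySem.Str.isIn "week5" cid && (PySem.Str.isIn "week5" (PySem.Str.lower src) || PySem.Str.isIn "event" (PySem.Str.lower src))) = true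
                · have hk : keywordHit cid src = true := by
                    unfold keywordHit; rw [h3, h5]; rfl
                  simp only [h3, h5, Bool.false_eq_true, if_false, if_true]
                  simp [hk]
                · rw [Bool.not_eq_true] at h5
                  have hk : keywordHit cid src = false := by
                    unfold keywordHit; rw [h3, h5]; rfl
                  simp only [h3, h5, Bool.false_eq_true, if_false]
                  simp [hk]
        · simp [ht, hr]
      · simp [ht]
    rw [hstep, List.append_assoc]

-- B's backward fold computes the rd-dedup of the hits and of the candidates
theorem bfold_eq (c cid : String) (edges : List (List (String × String))) :
    edges.foldr (fun e (p : List String × List String) =>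
        let d := PySem.Dict.ofList e
        if PySem.Dict.get? d "target" ≠ some c then p
        else if PySem.Str.upper (PySem.Dict.getD d "relationship" "") ≠ "CONSUMES" then p
        else
          match PySem.Dict.get? d "source" with
          | none => p
          | some s =>
            if s = "" then p
            else
              let cands := s :: p.2.filter (fun x => x != s)
              let sl := PySem.Str.lower s
              if (PySem.Str.isIn "week3" cid && (PySem.Str.isIn "week3" sl || PySem.Str.isIn "extraction" sl))
                 || (PySem.Str.isIn "week5" cid && (PySem.Str.isIn "week5" sl || PySem.Str.isIn "event" sl)) then
                (s :: p.1.filter (fun x => x != s), cands)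
              else (p.1, cands)) ([], [])
      = (rd ((edges.foldl (candStep c) []).filter (keywordHit cid)), rd (edges.foldl (candStep c) [])) := by
  induction edges with
  | nil => simp [List.foldl, rd]
  | cons e es ih =>
    simp only [List.foldr, List.foldl]
    rw [ih, candStep_append c es (candStep c [] e)]
    unfold candStep
    by_cases ht : PySem.Dict.get? (PySem.Dict.ofList e) "target" = some c
    · by_cases hr : PySem.Str.upper (PySem.Dict.getD (PySem.Dict.ofList e) "relationship" "") = "CONSUMES"
      · simp only [ht, hr]
        cases PySem.Dict.get? (PySem.Dict.ofList e) "source" with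
        | none => simp
        | some s =>
          by_cases hs : s = ""
          · simp [hs]
          · simp only [hs, ne_eq, not_true_eq_false, if_false, beq_self_eq_true, Bool.true_and,
              List.nil_append]
            by_cases hk : keywordHit cid s = true
            · have hk' : ((PySem.Str.isIn "week3" cid && (PySem.Str.isIn "week3" (PySem.Str.lower s) || PySem.Str.isIn "extraction" (PySem.Str.lower s)))
                 || (PySem.Str.isIn "week5" cid && (PySem.Str.isIn "week5" (PySem.Str.lower s) || PySem.Str.isIn "event" (PySem.Str.lower s)))) = true := by
                unfold keywordHit at hk; exact hk
              simp only [hk', if_true]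
              simp [hk, rd]
            · rw [Bool.not_eq_true] at hk
              have hk' : ((PySem.Str.isIn "week3" cid && (PySem.Str.isIn "week3" (PySem.Str.lower s) || PySem.Str.isIn "extraction" (PySem.Str.lower s)))
                 || (PySem.Str.isIn "week5" cid && (PySem.Str.isIn "week5" (PySem.Str.lower s) || PySem.Str.isIn "event" (PySem.Str.lower s)))) = false := by
                unfold keywordHit at hk; exact hk
              simp only [hk', Bool.false_eq_true, if_false]
              simp [hk, rd]
      · simp [ht, hr]
    · simp [ht]

-- ===== VERDICT =====
theorem upstream_producer_files_spec : Claim_equal_upstream_producer_files := by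
  intro edges consumer_id contract_id _
  unfold Spec_upstream_producer_files upstream_producer_files upstream_producer_files_alt
  cases consumer_id with
  | none => rfl
  | some c =>
    by_cases hc : c = ""
    · simp [hc]
    · simp only [hc, if_false]
      rw [pass1_eq_filter c (PySem.Str.lower contract_id) edges []]
      simp only [List.nil_append]
      have hfold : edges.foldl (fun acc e =>
          let d := PySem.Dict.ofList e
          if PySem.Dict.get? d "target" == some c && PySem.Str.upper (PySem.Dict.getD d "relationship" "") == "CONSUMES" then
            match PySem.Dict.get? d "source" with
            | none => acc
            | some s => if s = "" then acc else acc ++ [s]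
          else acc) [] = edges.foldl (candStep c) [] := rfl
      rw [hfold, List.foldl_reverse]
      have hb := bfold_eq c (PySem.Str.lower contract_id) edges
      rw [show (fun (e : List (String × String)) (p : List String × List String) =>
            let d := PySem.Dict.ofList e
            if PySem.Dict.get? d "target" ≠ some c then p
            else if PySem.Str.upper (PySem.Dict.getD d "relationship" "") ≠ "CONSUMES" then p
            else
              match PySem.Dict.get? d "source" with
              | none => p
              | some s =>
                if s = "" then p
                else
                  let cands := s :: p.2.filter (fun x => x != s)
                  let sl := PySem.Str.lower s
                  if (PySem.Str.isIn "week3" (PySem.Str.lower contract_id) && (PySem.Str.isIn "week3" sl || PySem.Str.isIn "extraction" sl))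
                     || (PySem.Str.isIn "week5" (PySem.Str.lower contract_id) && (PySem.Str.isIn "week5" sl || PySem.Str.isIn "event" sl)) then
                    (s :: p.1.filter (fun x => x != s), cands)
                  else (p.1, cands)) = (fun e p => _) from rfl] at hb ⊢
      rw [hb]
      set cs := edges.foldl (candStep c) [] with hcs
      set fl := cs.filter (keywordHit (PySem.Str.lower contract_id)) with hfl
      by_cases hf : fl = []
      · simp [hf, rd, ofList_eq_rd, rd_eq_nil_iff]
      · have : rd fl ≠ [] := by rw [ne_eq, rd_eq_nil_iff]; exact hf
        simp [hf, this, ofList_eq_rd]
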